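-- pv_equiv track=rewrite | github.com/Donna143/python-selenium-automation | algorithms_df/lesson_4_df/sum_between_min_and_max.py | sum_between_min_and_max
-- ===== SOURCE A (Python) =====
-- def sum_between_min_and_max(arr):
--     min_item = max_item = arr[0]
--     min_index = max_index = i = 0
--
--     while i < len(arr):
--         if arr[i] > max_item:
--             max_item = arr[i]
--             max_index = i
--         if arr[i] < min_item:
--             min_item = arr[i]
--             min_index = i
--         i += 1
--
--     return sum(arr[min(min_index, max_index) + 1:max(min_index, max_index)])
-- ===== SOURCE B (Python) =====
-- def sum_between_min_and_max(arr):
--     # One pass builds prefix sums; argmin/argmax found as index reductions with a key;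
--     # the answer is a prefix-sum subtraction instead of re-scanning a slice.
--     total = 0
--     pref = [0]
--     for x in arr:
--         total += x
--         pref.append(total)
--     lo = min(range(len(arr)), key=lambda i: arr[i])
--     hi = max(range(len(arr)), key=lambda i: arr[i])
--     a, b = (lo, hi) if lo <= hi else (hi, lo)
--     return pref[b] - pref[a + 1] if a + 1 <= b else 0
-- ===== Notes on version B (the rewrite author's own statement) =====
-- stated objective: alternative
-- what changed: B builds a prefix-sum array in one pass, finds the first argmin/argmax as index reductions over range(len(arr)) with a key, and returns the answer by prefix-sum subtraction, instead of A's fused item/index-tracking scan followed by summing a slice.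
-- outside the precondition, e.g. on sum_between_min_and_max([]): A raises IndexError, B raises ValueError
import Mathlib
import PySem

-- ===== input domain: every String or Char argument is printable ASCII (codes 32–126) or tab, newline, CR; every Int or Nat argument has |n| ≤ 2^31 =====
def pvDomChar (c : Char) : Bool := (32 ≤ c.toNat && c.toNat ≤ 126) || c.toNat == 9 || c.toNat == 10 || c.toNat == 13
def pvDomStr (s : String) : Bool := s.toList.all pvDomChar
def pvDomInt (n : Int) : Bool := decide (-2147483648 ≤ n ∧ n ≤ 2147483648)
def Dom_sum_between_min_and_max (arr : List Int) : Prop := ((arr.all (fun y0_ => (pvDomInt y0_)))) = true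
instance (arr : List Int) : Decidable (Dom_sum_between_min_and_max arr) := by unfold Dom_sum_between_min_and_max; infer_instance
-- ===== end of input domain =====

-- B replaces A's fused item/index-tracking scan + slice-sum by a prefix-sum array, argmin/argmax
-- as index reductions over range(len(arr)) with a key, and a prefix-sum subtraction (objective: alternative).

-- ===== PORT A =====
-- A's while loop: state (min_item, max_item, min_index, max_index), second argument is the index i
def pvLoopA : List Int → Nat → Int → Int → Nat → Nat → Int × Int × Nat × Nat
  | [], _, mi, ma, imin, imax => (mi, ma, imin, imax)
  | x :: rest, i, mi, ma, imin, imax =>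
      let (ma', imax') := if x > ma then (x, i) else (ma, imax)
      let (mi', imin') := if x < mi then (x, i) else (mi, imin)
      pvLoopA rest (i + 1) mi' ma' imin' imax'

def sum_between_min_and_max (arr : List Int) : Int :=
  match arr with
  | [] => 0   -- A raises IndexError on []; excluded by Pre_
  | a :: _ =>
    let (_, _, imin, imax) := pvLoopA arr 0 a a 0 0
    (PySem.List.slice arr (some ((min imin imax : Nat) + 1 : Int)) (some ((max imin imax : Nat) : Int))).sum

-- ===== PORT B =====
-- B's prefix-sum loop: state (pref, total)
def pvPref (arr : List Int) : List Int :=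
  (arr.foldl (fun s x => (s.1 ++ [s.2 + x], s.2 + x)) (([0] : List Int), (0 : Int))).1

def sum_between_min_and_max_alt (arr : List Int) : Int :=
  let pref := pvPref arr
  -- min/max(range(len(arr)), key=lambda i: arr[i]); arr[i] with i from the range is always
  -- in range, so pyGetD's default 0 is never consulted
  match PySem.List.min? (PySem.List.pyRange 0 (arr.length : Int)) (fun i => PySem.List.pyGetD arr i 0),
        PySem.List.max? (PySem.List.pyRange 0 (arr.length : Int)) (fun i => PySem.List.pyGetD arr i 0) with
  | some lo, some hi =>
      let ab := if lo ≤ hi then (lo, hi) else (hi, lo)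
      -- pref[b] / pref[a+1]: both indices are ≤ len(arr) = len(pref) - 1, in range
      if ab.1 + 1 ≤ ab.2 then PySem.List.pyGetD pref ab.2 0 - PySem.List.pyGetD pref (ab.1 + 1) 0 else 0
  | _, _ => 0   -- unreachable for nonempty arr; on [] Python B raises ValueError (outside Pre_)

-- ===== PRECONDITION & SPEC =====
-- Pre_ excludes only the empty list, on which A raises IndexError (and B ValueError).
def Pre_sum_between_min_and_max (arr : List Int) : Prop := arr ≠ []
instance (arr : List Int) : Decidable (Pre_sum_between_min_and_max arr) := by unfold Pre_sum_between_min_and_max; infer_instance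
def pvWitness_sum_between_min_and_max : List Int := [3, 1, 2]

def Spec_sum_between_min_and_max (arr : List Int) (out : Int) : Prop := out = sum_between_min_and_max_alt arr
instance (arr : List Int) (out : Int) : Decidable (Spec_sum_between_min_and_max arr out) := by unfold Spec_sum_between_min_and_max; infer_instance

-- ===== CLAIM (what is proved, stated in full; the proofs are below) =====
def Claim_equal_sum_between_min_and_max : Prop := ∀ (arr : List Int), Dom_sum_between_min_and_max arr → Pre_sum_between_min_and_max arr → Spec_sum_between_min_and_max arr (sum_between_min_and_max arr)

-- ===== LEMMAS AND PROOFS =====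

theorem min_step (p : List Int) (x mi : Int)
    (h : PySem.List.min? p (fun y => y) = some mi) :
    PySem.List.min? (p ++ [x]) (fun y => y) = some (if x < mi then x else mi) := by
  cases p with
  | nil => rw [show (PySem.List.min? ([] : List Int) (fun y => y)) = none from (PySem.List.min?_eq_none_iff [] (fun y => y)).mpr rfl] at h; cases h
  | cons a t =>
    rw [PySem.List.min?_id_cons] at h
    rw [show ((a :: t) ++ [x]) = a :: (t ++ [x]) from rfl, PySem.List.min?_id_cons, List.foldl_append]
    injection h with h
    subst h
    congr 1
    simp only [List.foldl]
    rw [Int.min_def]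
    split_ifs <;> omega

theorem max_step (p : List Int) (x ma : Int)
    (h : PySem.List.max? p (fun y => y) = some ma) :
    PySem.List.max? (p ++ [x]) (fun y => y) = some (if x > ma then x else ma) := by
  cases p with
  | nil => rw [show (PySem.List.max? ([] : List Int) (fun y => y)) = none from (PySem.List.max?_eq_none_iff [] (fun y => y)).mpr rfl] at h; cases h
  | cons a t =>
    rw [PySem.List.max?_id_cons] at h
    rw [show ((a :: t) ++ [x]) = a :: (t ++ [x]) from rfl, PySem.List.max?_id_cons, List.foldl_append]
    injection h with h
    subst h
    congr 1
    simp only [List.foldl]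
    rw [Int.max_def]
    split_ifs <;> omega

theorem idx_min_step (p : List Int) (x mi : Int) (imin : Nat)
    (hm : PySem.List.min? p (fun y => y) = some mi)
    (h : PySem.List.index? p mi = some imin) :
    PySem.List.index? (p ++ [x]) (if x < mi then x else mi) =
      some (if x < mi then p.length else imin) := by
  split_ifs with hx
  · have hnot : x ∉ p := fun mem => absurd (PySem.List.min?_isMin hm x mem) (by omega)
    exact PySem.List.index?_append_singleton_self p x hnot
  · have hmem : mi ∈ p := PySem.List.min?_mem hm
    rw [PySem.List.index?_append_of_mem [x] hmem]; exact h

theorem idx_max_step (p : List Int) (x ma : Int) (imax : Nat)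
    (hm : PySem.List.max? p (fun y => y) = some ma)
    (h : PySem.List.index? p ma = some imax) :
    PySem.List.index? (p ++ [x]) (if x > ma then x else ma) =
      some (if x > ma then p.length else imax) := by
  split_ifs with hx
  · have hnot : x ∉ p := fun mem => absurd (PySem.List.max?_isMax hm x mem) (by omega)
    exact PySem.List.index?_append_singleton_self p x hnot
  · have hmem : ma ∈ p := PySem.List.max?_mem hm
    rw [PySem.List.index?_append_of_mem [x] hmem]; exact h

-- invariant: after the loop has processed prefix p (nonempty), the state is exactly
-- (min of p, max of p, first index of that min in p, first index of that max in p)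
theorem pvLoopA_invariant (r : List Int) : ∀ (p : List Int) (mi ma : Int) (imin imax : Nat),
    PySem.List.min? p (fun y => y) = some mi →
    PySem.List.index? p mi = some imin →
    PySem.List.max? p (fun y => y) = some ma →
    PySem.List.index? p ma = some imax →
    ∃ mi' ma' imin' imax',
      pvLoopA r p.length mi ma imin imax = (mi', ma', imin', imax') ∧
      PySem.List.min? (p ++ r) (fun y => y) = some mi' ∧
      PySem.List.index? (p ++ r) mi' = some imin' ∧
      PySem.List.max? (p ++ r) (fun y => y) = some ma' ∧
      PySem.List.index? (p ++ r) ma' = some imax' := by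
  induction r with
  | nil =>
    intro p mi ma imin imax h1 h2 h3 h4
    exact ⟨mi, ma, imin, imax, rfl, by simpa using h1, by simpa using h2,
      by simpa using h3, by simpa using h4⟩
  | cons x r ih =>
    intro p mi ma imin imax h1 h2 h3 h4
    have h1' := min_step p x mi h1
    have h2' := idx_min_step p x mi imin h1 h2
    have h3' := max_step p x ma h3
    have h4' := idx_max_step p x ma imax h3 h4
    have hlen : (p ++ [x]).length = p.length + 1 := by simp
    have happ : p ++ x :: r = (p ++ [x]) ++ r := by simp
    obtain ⟨mi', ma', imin', imax', heq, a1, a2, a3, a4⟩ :=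
      ih (p ++ [x]) (if x < mi then x else mi) (if x > ma then x else ma)
        (if x < mi then p.length else imin) (if x > ma then p.length else imax)
        h1' h2' h3' h4'
    refine ⟨mi', ma', imin', imax', ?_, by rwa [happ], by rwa [happ], by rwa [happ], by rwa [happ]⟩
    rw [hlen] at heq
    simp only [pvLoopA]
    split_ifs at heq ⊢ <;> simp_all

-- B's prefix-sum fold, fully characterised (generalised over the starting state)
theorem pvPref_fold (ys : List Int) : ∀ (p : List Int) (t : Int),
    ys.foldl (fun s x => (s.1 ++ [s.2 + x], s.2 + x)) (p, t) =
      (p ++ (List.range ys.length).map (fun k => t + ((ys.take (k+1)).sum)), t + ys.sum) := by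
  induction ys with
  | nil => intro p t; simp
  | cons x xs ih =>
    intro p t
    simp only [List.foldl_cons]
    rw [ih]
    refine Prod.ext ?_ (by simp; ring)
    simp only [List.length_cons, List.take_succ_cons, List.sum_cons]
    rw [List.range_succ_eq_map, List.map_cons, List.map_map]
    simp [Function.comp, add_assoc]

-- pref[k] is the sum of the first k elements
theorem pvPref_getD (arr : List Int) (k : Nat) (hk : k ≤ arr.length) :
    PySem.List.pyGetD (pvPref arr) (k : Int) 0 = (arr.take k).sum := by
  unfold pvPref
  rw [pvPref_fold, PySem.List.pyGetD_natCast]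
  cases k with
  | zero => simp
  | succ j =>
    have hj : j < arr.length := by omega
    simp [List.getD, hj]

-- min over the index range with key arr[i] is the first index of the minimum of the prefix
theorem min_range (arr : List Int) : ∀ (n : Nat), 1 ≤ n → n ≤ arr.length →
    ∃ m j, PySem.List.min? (arr.take n) (fun y => y) = some m ∧
      PySem.List.index? (arr.take n) m = some j ∧
      PySem.List.min? (List.map (fun (k : Nat) => (k : Int)) (List.range n))
        (fun i => PySem.List.pyGetD arr i 0) = some (j : Int) := by
  intro n
  induction n with
  | zero => omega
  | succ n ih =>
    intro _ hle
    have hnlt : n < arr.length := by omega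
    have htake : arr.take (n+1) = arr.take n ++ [arr[n]] := by
      rw [List.take_add_one]; simp [List.getElem?_eq_getElem hnlt]
    by_cases hn : 1 ≤ n
    · obtain ⟨m, j, h1, h2, h3⟩ := ih hn (by omega)
      obtain ⟨hjlt, hjv, -⟩ := PySem.List.getElem_of_index?_eq_some h2
      have hjlen : j < arr.length := by have := hjlt; simp at this; omega
      have hkeyj : PySem.List.pyGetD arr ((j : Nat) : Int) 0 = m := by
        rw [PySem.List.pyGetD_natCast, List.getD_eq_getElem _ _ hjlen]
        rw [List.getElem_take] at hjv; exact hjv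
      have hkeyn : PySem.List.pyGetD arr ((n : Nat) : Int) 0 = arr[n] := by
        rw [PySem.List.pyGetD_natCast, List.getD_eq_getElem _ _ hnlt]
      have hlen : (arr.take n).length = n := by simp [Nat.le_of_lt hnlt]
      refine ⟨if arr[n] < m then arr[n] else m, if arr[n] < m then n else j, ?_, ?_, ?_⟩
      · rw [htake]; exact min_step _ _ _ h1
      · rw [htake]
        have := idx_min_step (arr.take n) arr[n] m j h1 h2
        rwa [hlen] at this
      · rw [List.range_succ, List.map_append]
        simp only [PySem.List.min?, List.foldl_append] at h3 ⊢
        rw [h3]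
        simp only [List.map_cons, List.map_nil, List.foldl_cons, List.foldl_nil]
        simp only [hkeyj, hkeyn]
        split_ifs <;> rfl
    · have hn0 : n = 0 := by omega
      subst hn0
      refine ⟨arr[0], 0, ?_, ?_, ?_⟩
      · rw [htake]; simp [PySem.List.min?_id_cons]
      · rw [htake]; simp
      · rfl

-- max over the index range with key arr[i] is the first index of the maximum of the prefix
theorem max_range (arr : List Int) : ∀ (n : Nat), 1 ≤ n → n ≤ arr.length →
    ∃ m j, PySem.List.max? (arr.take n) (fun y => y) = some m ∧
      PySem.List.index? (arr.take n) m = some j ∧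
      PySem.List.max? (List.map (fun (k : Nat) => (k : Int)) (List.range n))
        (fun i => PySem.List.pyGetD arr i 0) = some (j : Int) := by
  intro n
  induction n with
  | zero => omega
  | succ n ih =>
    intro _ hle
    have hnlt : n < arr.length := by omega
    have htake : arr.take (n+1) = arr.take n ++ [arr[n]] := by
      rw [List.take_add_one]; simp [List.getElem?_eq_getElem hnlt]
    by_cases hn : 1 ≤ n
    · obtain ⟨m, j, h1, h2, h3⟩ := ih hn (by omega)
      obtain ⟨hjlt, hjv, -⟩ := PySem.List.getElem_of_index?_eq_some h2
      have hjlen : j < arr.length := by have := hjlt; simp at this; omega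
      have hkeyj : PySem.List.pyGetD arr ((j : Nat) : Int) 0 = m := by
        rw [PySem.List.pyGetD_natCast, List.getD_eq_getElem _ _ hjlen]
        rw [List.getElem_take] at hjv; exact hjv
      have hkeyn : PySem.List.pyGetD arr ((n : Nat) : Int) 0 = arr[n] := by
        rw [PySem.List.pyGetD_natCast, List.getD_eq_getElem _ _ hnlt]
      have hlen : (arr.take n).length = n := by simp [Nat.le_of_lt hnlt]
      refine ⟨if arr[n] > m then arr[n] else m, if arr[n] > m then n else j, ?_, ?_, ?_⟩
      · rw [htake]; exact max_step _ _ _ h1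
      · rw [htake]
        have := idx_max_step (arr.take n) arr[n] m j h1 h2
        rwa [hlen] at this
      · rw [List.range_succ, List.map_append]
        simp only [PySem.List.max?, List.foldl_append] at h3 ⊢
        rw [h3]
        simp only [List.map_cons, List.map_nil, List.foldl_cons, List.foldl_nil]
        simp only [hkeyj, hkeyn]
        split_ifs <;> rfl
    · have hn0 : n = 0 := by omega
      subst hn0
      refine ⟨arr[0], 0, ?_, ?_, ?_⟩
      · rw [htake]; simp [PySem.List.max?_id_cons]
      · rw [htake]; simp
      · rfl

-- sum of a slice as a difference of prefix sums
theorem sum_take_sub (l : List Int) (a b : Nat) (hab : a ≤ b) :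
    (List.take (b - a) (List.drop a l)).sum = (l.take b).sum - (l.take a).sum := by
  have h : l.take b = l.take a ++ List.take (b - a) (List.drop a l) := by
    rw [← List.take_add (l := l) (i := a) (j := b - a)]
    congr 1; omega
  rw [h, List.sum_append]; ring

theorem pv_eq (arr : List Int) (h : arr ≠ []) :
    sum_between_min_and_max arr = sum_between_min_and_max_alt arr := by
  cases arr with
  | nil => exact absurd rfl h
  | cons a t =>
    -- A's loop characterisation
    have h1 : PySem.List.min? [a] (fun y => y) = some a := by
      rw [PySem.List.min?_id_cons]; rfl
    have h2 : PySem.List.index? [a] a = some 0 := PySem.List.index?_cons_self a []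
    have h3 : PySem.List.max? [a] (fun y => y) = some a := by
      rw [PySem.List.max?_id_cons]; rfl
    obtain ⟨mi', ma', imin', imax', heq, a1, a2, a3, a4⟩ :=
      pvLoopA_invariant t [a] a a 0 0 h1 h2 h3 h2
    have hstep : pvLoopA (a :: t) 0 a a 0 0 = pvLoopA t 1 a a 0 0 := by
      simp [pvLoopA]
    have happ : ([a] : List Int) ++ t = a :: t := rfl
    rw [happ] at a1 a2 a3 a4
    -- B's reductions characterised on the full list
    have hlen1 : 1 ≤ (a :: t).length := by simp
    obtain ⟨m, j, b1, b2, b3⟩ := min_range (a :: t) (a :: t).length hlen1 le_rfl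
    obtain ⟨M, J, c1, c2, c3⟩ := max_range (a :: t) (a :: t).length hlen1 le_rfl
    rw [List.take_length] at b1 b2 c1 c2
    -- identify B's indices with A's
    have hm : mi' = m := Option.some.inj (a1.symm.trans b1)
    subst hm
    have hj : imin' = j := Option.some.inj (a2.symm.trans b2)
    subst hj
    have hM : ma' = M := Option.some.inj (a3.symm.trans c1)
    subst hM
    have hJ : imax' = J := Option.some.inj (a4.symm.trans c2)
    subst hJ
    -- index bounds
    obtain ⟨hilt, -, -⟩ := PySem.List.getElem_of_index?_eq_some a2
    obtain ⟨hIlt, -, -⟩ := PySem.List.getElem_of_index?_eq_some a4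
    -- evaluate both sides
    simp only [sum_between_min_and_max, sum_between_min_and_max_alt, hstep]
    rw [show pvLoopA t 1 a a 0 0 = pvLoopA t ([a] : List Int).length a a 0 0 from rfl, heq]
    rw [PySem.List.pyRange_zero_natCast, b3, c3]
    -- ab = (min, max) of the two indices, as Ints
    have hab : (if ((imin' : Nat) : Int) ≤ ((imax' : Nat) : Int)
        then (((imin' : Nat) : Int), ((imax' : Nat) : Int))
        else (((imax' : Nat) : Int), ((imin' : Nat) : Int)))
        = (((min imin' imax' : Nat) : Int), ((max imin' imax' : Nat) : Int)) := by
      rcases Nat.le_total imin' imax' with hle | hle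
      · rw [if_pos (by exact_mod_cast hle)]
        simp [Nat.min_eq_left hle, Nat.max_eq_right hle]
      · rcases Nat.lt_or_ge imax' imin' with hlt | hge
        · rw [if_neg (by exact_mod_cast Nat.not_le.mpr hlt)]
          simp [Nat.min_eq_right hle, Nat.max_eq_left hle]
        · have : imin' = imax' := le_antisymm hge hle
          subst this
          simp
    simp only [hab]
    -- both sides are the prefix-sum difference / the slice sum of the same index interval
    have hilen : imin' < (a :: t).length := by have := hilt; simp at this; omega
    have hIlen : imax' < (a :: t).length := by have := hIlt; simp at this; omega
    have hcast : ((min imin' imax' : Nat) : Int) + 1 = (((min imin' imax' + 1 : Nat)) : Int) := by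
      push_cast
      ring
    rw [hcast, PySem.List.slice_natCast]
    by_cases hle : min imin' imax' + 1 ≤ max imin' imax'
    · rw [if_pos (by exact_mod_cast hle)]
      rw [pvPref_getD (a :: t) (max imin' imax') (by omega),
        pvPref_getD (a :: t) (min imin' imax' + 1) (by omega)]
      exact sum_take_sub (a :: t) (min imin' imax' + 1) (max imin' imax') hle
    · rw [if_neg (by exact_mod_cast hle)]
      have hz : max imin' imax' - (min imin' imax' + 1) = 0 := by omega
      rw [hz]
      simp

-- ===== VERDICT (by name: the statement is the Claim_ definition above) =====
theorem sum_between_min_and_max_spec : Claim_equal_sum_between_min_and_max := by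
  intro arr _ hpre
  unfold Spec_sum_between_min_and_max
  exact pv_eq arr hpre
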